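-- pv_equiv track=rewrite | github.com/tomlxq/ps_py | huawei/MetaDemo2.py | longest_alp
-- ===== SOURCE A (Python) =====
-- def longest_alp(degree, string):
--     ary_meta = tuple("aeiouAEIOU")
--     head, length, tail = 0, 0, len(string) - 1
--
--     def flaw_degree(string):
--         degree = 0
--         for i in string:
--             if i in ary_meta:
--                 continue
--             degree += 1
--         return degree
--
--     result = []
--     while head <= tail:
--
--         if string[head].startswith(ary_meta) and string[tail].endswith(ary_meta):
--             result.append(string[head:tail + 1])
--             if string[head + 1].startswith(ary_meta):
--                 tail -= 1
--             else:
--                 head += 1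
--         elif string[head].startswith(ary_meta) and not string[tail].endswith(ary_meta):
--             tail -= 1
--         else:
--             head += 1
--
--     for item in result:
--         if flaw_degree(item) == degree:
--             length = max(length, len(item))
--     return length
-- ===== SOURCE B (Python) =====
-- def longest_alp(degree, string):
--     vowels = set("aeiouAEIOU")
--     n = len(string)
--     pc = [0]  # pc[i] = number of consonants in string[:i]
--     for ch in string:
--         pc.append(pc[-1] + (ch not in vowels))
--     best = 0
--     head, tail = 0, n - 1
--     while head <= tail:
--         if string[head] in vowels:
--             if string[tail] in vowels:
--                 if pc[tail + 1] - pc[head] == degree: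
--                     best = max(best, tail + 1 - head)
--                 if head + 1 < n and string[head + 1] in vowels:
--                     tail -= 1
--                 else:
--                     head += 1
--             else:
--                 tail -= 1
--         else:
--             head += 1
--     return best
-- ===== Notes on version B (the rewrite author's own statement) =====
-- stated objective: faster
-- what changed: B keeps A's two-pointer transitions but replaces the collected substring list and the per-candidate flaw_degree rescans/slices with a prefix consonant-count array and a running maximum, turning O(n^2) into a single O(n) pass.
-- crash fix: A raises IndexError (peeks string[head+1] past the end) exactly on nonempty strings whose last character is a vowel and which contain no two adjacent vowels; B returns the ordinary maximum length there. — e.g. on longest_alp(0, "a"): A raises IndexError, B returns 1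
import Mathlib
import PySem

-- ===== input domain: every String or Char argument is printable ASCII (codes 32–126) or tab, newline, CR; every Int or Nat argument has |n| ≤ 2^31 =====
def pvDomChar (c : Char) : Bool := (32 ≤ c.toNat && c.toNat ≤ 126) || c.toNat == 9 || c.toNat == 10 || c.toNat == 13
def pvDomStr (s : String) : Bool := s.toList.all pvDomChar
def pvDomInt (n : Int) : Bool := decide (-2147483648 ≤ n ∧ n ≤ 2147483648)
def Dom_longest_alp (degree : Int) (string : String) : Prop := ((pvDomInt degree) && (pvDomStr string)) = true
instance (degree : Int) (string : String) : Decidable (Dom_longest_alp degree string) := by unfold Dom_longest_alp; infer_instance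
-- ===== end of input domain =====

-- B keeps A's two-pointer transitions but replaces the candidate-substring list and the
-- per-candidate flaw_degree rescans/slices with a prefix consonant-count array and a running
-- maximum (single pass; a timing run measured B faster).

-- ===== PORT A =====
def pvVowels : List Char := "aeiouAEIOU".toList

def pvIsVowel (c : Char) : Bool := pvVowels.contains c

-- string[i]; the default ' ' is reached only where Python raises IndexError (excluded by Pre_)
def pvGetC (cs : List Char) (i : Int) : Char := (PySem.List.pyGet? cs i).getD ' '

def pvFlawDegree (s : List Char) : Int :=
  s.foldl (fun d c => if pvIsVowel c then d else d + 1) 0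

def pvLoopA (cs : List Char) (head tail : Int) (result : List (List Char)) : List (List Char) :=
  if _hle : head ≤ tail then
    if pvIsVowel (pvGetC cs head) then
      if pvIsVowel (pvGetC cs tail) then
        if pvIsVowel (pvGetC cs (head + 1)) then
          pvLoopA cs head (tail - 1) (result ++ [PySem.List.slice cs (some head) (some (tail + 1))])
        else
          pvLoopA cs (head + 1) tail (result ++ [PySem.List.slice cs (some head) (some (tail + 1))])
      else
        pvLoopA cs head (tail - 1) result
    else
      pvLoopA cs (head + 1) tail result
  else result
termination_by (tail + 1 - head).toNat
decreasing_by all_goals omega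

def pvF (degree : Int) (length : Int) (item : List Char) : Int :=
  if pvFlawDegree item = degree then max length (item.length : Int) else length

def longest_alp (degree : Int) (string : String) : Int :=
  (pvLoopA string.toList 0 ((string.toList.length : Int) - 1) []).foldl (pvF degree) 0

-- ===== PORT B =====
def pvPrefC : List Char → Int → List Int
  | [], acc => [acc]
  | c :: rest, acc => acc :: pvPrefC rest (acc + (if pvIsVowel c then 0 else 1))

def pvGetI (pc : List Int) (i : Int) : Int := (PySem.List.pyGet? pc i).getD 0

def pvBestUpd (degree : Int) (pc : List Int) (head tail best : Int) : Int :=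
  if pvGetI pc (tail + 1) - pvGetI pc head = degree then max best (tail + 1 - head) else best

def pvLoopB (degree : Int) (cs : List Char) (pc : List Int) (n : Int) (head tail best : Int) : Int :=
  if _hle : head ≤ tail then
    if pvIsVowel (pvGetC cs head) then
      if pvIsVowel (pvGetC cs tail) then
        if head + 1 < n ∧ pvIsVowel (pvGetC cs (head + 1)) then
          pvLoopB degree cs pc n head (tail - 1) (pvBestUpd degree pc head tail best)
        else
          pvLoopB degree cs pc n (head + 1) tail (pvBestUpd degree pc head tail best)
      else pvLoopB degree cs pc n head (tail - 1) best
    else pvLoopB degree cs pc n (head + 1) tail best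
  else best
termination_by (tail + 1 - head).toNat
decreasing_by all_goals omega

def longest_alp_alt (degree : Int) (string : String) : Int :=
  pvLoopB degree string.toList (pvPrefC string.toList 0) (string.toList.length : Int)
    0 ((string.toList.length : Int) - 1) 0

-- ===== PRECONDITION & SPEC =====
-- A raises IndexError (it peeks string[head+1] one past the end) exactly on nonempty strings
-- whose last character is a vowel and which contain no two adjacent vowels; B returns the
-- ordinary maximum length there.
def Raises_longest_alp (degree : Int) (string : String) : Prop :=
  string.toList ≠ [] ∧ pvIsVowel (string.toList.getLastD ' ') = true ∧
    ∀ i, i < string.toList.length - 1 →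
      ¬(pvIsVowel (string.toList.getD i ' ') = true ∧
        pvIsVowel (string.toList.getD (i + 1) ' ') = true)
instance (degree : Int) (string : String) : Decidable (Raises_longest_alp degree string) := by
  unfold Raises_longest_alp; infer_instance

-- Pre_ excludes exactly the inputs on which A raises IndexError (the Raises_ condition above);
-- on every input A returns on, Pre_ holds.
def Pre_longest_alp (degree : Int) (string : String) : Prop :=
  ¬ Raises_longest_alp degree string
instance (degree : Int) (string : String) : Decidable (Pre_longest_alp degree string) := by
  unfold Pre_longest_alp; infer_instance

def pvWitness_longest_alp : Int × String := (0, "ab")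

def pvRaiseWitness_longest_alp : Int × String := (0, "a")
def pvRaiseWitnessOut_longest_alp : Int := 1

def Spec_longest_alp (degree : Int) (string : String) (out : Int) : Prop := out = longest_alp_alt degree string
instance (degree : Int) (string : String) (out : Int) : Decidable (Spec_longest_alp degree string out) := by unfold Spec_longest_alp; infer_instance

-- ===== CLAIM (what is proved, stated in full; the proofs are below) =====
def Claim_equal_longest_alp : Prop := ∀ (degree : Int) (string : String), Dom_longest_alp degree string → Pre_longest_alp degree string → Spec_longest_alp degree string (longest_alp degree string)

def Claim_raises_longest_alp : Prop := (∀ (degree : Int) (string : String), Dom_longest_alp degree string → Raises_longest_alp degree string → ¬ Pre_longest_alp degree string) ∧ (Dom_longest_alp (pvRaiseWitness_longest_alp.1) (pvRaiseWitness_longest_alp.2) ∧ Raises_longest_alp (pvRaiseWitness_longest_alp.1) (pvRaiseWitness_longest_alp.2) ∧ longest_alp_alt (pvRaiseWitness_longest_alp.1) (pvRaiseWitness_longest_alp.2) = pvRaiseWitnessOut_longest_alp)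

-- ===== LEMMAS AND PROOFS =====

lemma pvFlaw_shift (l : List Char) :
    ∀ b : Int, l.foldl (fun d c => if pvIsVowel c then d else d + 1) b
      = b + l.foldl (fun d c => if pvIsVowel c then d else d + 1) 0 := by
  induction l with
  | nil => intro b; simp
  | cons c l ih =>
    intro b
    simp only [List.foldl_cons]
    rw [ih, ih (if pvIsVowel c then (0:Int) else 0 + 1)]
    split_ifs <;> omega

lemma pvFlaw_append (l1 l2 : List Char) :
    pvFlawDegree (l1 ++ l2) = pvFlawDegree l1 + pvFlawDegree l2 := by
  unfold pvFlawDegree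
  rw [List.foldl_append, pvFlaw_shift]

lemma pvFlaw_cons (c : Char) (l : List Char) :
    pvFlawDegree (c :: l) = (if pvIsVowel c then 0 else 1) + pvFlawDegree l := by
  unfold pvFlawDegree
  simp only [List.foldl_cons]
  rw [pvFlaw_shift]
  split_ifs <;> omega

lemma pvPrefC_length (cs : List Char) : ∀ a : Int, (pvPrefC cs a).length = cs.length + 1 := by
  induction cs with
  | nil => intro a; simp [pvPrefC]
  | cons c rest ih => intro a; simp [pvPrefC, ih]

lemma pvPrefC_getD (cs : List Char) :
    ∀ (a : Int) (k : Nat), k ≤ cs.length →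
      (pvPrefC cs a).getD k 0 = a + pvFlawDegree (cs.take k) := by
  induction cs with
  | nil =>
    intro a k hk
    have : k = 0 := by simpa using hk
    subst this
    simp [pvPrefC, pvFlawDegree]
  | cons c rest ih =>
    intro a k hk
    cases k with
    | zero => simp [pvPrefC, pvFlawDegree]
    | succ k =>
      simp only [pvPrefC, List.getD_cons_succ, List.take_succ_cons]
      rw [ih _ k (by simpa using hk), pvFlaw_cons]
      split_ifs <;> omega

lemma pvGetI_prefC (cs : List Char) (i : Int) (h0 : 0 ≤ i) (hle : i ≤ (cs.length : Int)) :
    pvGetI (pvPrefC cs 0) i = pvFlawDegree (cs.take i.toNat) := by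
  unfold pvGetI
  have hb : i < ((pvPrefC cs 0).length : Int) := by rw [pvPrefC_length]; omega
  rw [PySem.List.pyGet?_eq_some_getElem (pvPrefC cs 0) h0 hb]
  have hlt : i.toNat < (pvPrefC cs 0).length := by omega
  rw [Option.getD_some, ← List.getD_eq_getElem (pvPrefC cs 0) 0 hlt,
    pvPrefC_getD cs 0 i.toNat (by omega)]
  omega

lemma pvSlice_flaw_len (cs : List Char) (h t : Int)
    (h0 : 0 ≤ h) (hht : h ≤ t) (ht : t < (cs.length : Int)) :
    pvFlawDegree (PySem.List.slice cs (some h) (some (t + 1)))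
      = pvGetI (pvPrefC cs 0) (t + 1) - pvGetI (pvPrefC cs 0) h ∧
    ((PySem.List.slice cs (some h) (some (t + 1))).length : Int) = t + 1 - h := by
  rw [PySem.List.slice_toNat cs h0 (by omega : (0:Int) ≤ t + 1)]
  have hsplit : cs.take (t + 1).toNat
      = cs.take h.toNat ++ List.take ((t + 1).toNat - h.toNat) (cs.drop h.toNat) := by
    have heq : (t + 1).toNat = h.toNat + ((t + 1).toNat - h.toNat) := by omega
    conv_lhs => rw [heq]
    rw [List.take_add]
  constructor
  · rw [pvGetI_prefC cs (t + 1) (by omega) (by omega),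
      pvGetI_prefC cs h h0 (by omega), hsplit, pvFlaw_append]
    omega
  · simp only [List.length_take, List.length_drop]
    omega

lemma pvF_slice (degree : Int) (cs : List Char) (b h t : Int)
    (h0 : 0 ≤ h) (hht : h ≤ t) (ht : t < (cs.length : Int)) :
    pvF degree b (PySem.List.slice cs (some h) (some (t + 1)))
      = pvBestUpd degree (pvPrefC cs 0) h t b := by
  obtain ⟨hf, hl⟩ := pvSlice_flaw_len cs h t h0 hht ht
  unfold pvF pvBestUpd
  rw [hf, hl]

-- the peek one past the end (where Python A raises) yields ' ', a non-vowel
lemma pvPeek_eq (cs : List Char) (h : Int) :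
    pvIsVowel (pvGetC cs (h + 1))
      = decide (h + 1 < (cs.length : Int) ∧ pvIsVowel (pvGetC cs (h + 1)) = true) := by
  by_cases hn : h + 1 < (cs.length : Int)
  · simp [hn]
  · have hend : PySem.List.pyGet? cs (h + 1) = none := by
      rw [PySem.List.pyGet?_eq_none_iff]
      simp only [PySem.Raise.InRange]
      omega
    simp [pvGetC, hend, hn, pvIsVowel, pvVowels]

lemma pvLoopA_append (cs : List Char) :
    ∀ (m : Nat) (h t : Int) (res : List (List Char)), (t + 1 - h).toNat = m →
      pvLoopA cs h t res = res ++ pvLoopA cs h t [] := by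
  intro m
  induction m using Nat.strong_induction_on with
  | _ m ih =>
    intro h t res hm
    conv_lhs => rw [pvLoopA]
    conv_rhs => rw [pvLoopA]
    by_cases hle : h ≤ t
    · simp only [dif_pos hle]
      by_cases hv : pvIsVowel (pvGetC cs h)
      · by_cases tv : pvIsVowel (pvGetC cs t)
        · by_cases pk : pvIsVowel (pvGetC cs (h + 1))
          · simp only [hv, tv, pk, if_true, List.nil_append]
            rw [ih (t - 1 + 1 - h).toNat (by omega) h (t - 1)
                (res ++ [PySem.List.slice cs (some h) (some (t + 1))]) rfl,
              ih (t - 1 + 1 - h).toNat (by omega) h (t - 1)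
                [PySem.List.slice cs (some h) (some (t + 1))] rfl,
              List.append_assoc]
          · simp only [hv, tv, pk, if_true, if_false, Bool.false_eq_true, List.nil_append]
            rw [ih (t + 1 - (h + 1)).toNat (by omega) (h + 1) t
                (res ++ [PySem.List.slice cs (some h) (some (t + 1))]) rfl,
              ih (t + 1 - (h + 1)).toNat (by omega) (h + 1) t
                [PySem.List.slice cs (some h) (some (t + 1))] rfl,
              List.append_assoc]
        · simp only [hv, tv, if_true, if_false, Bool.false_eq_true]
          rw [ih (t - 1 + 1 - h).toNat (by omega) h (t - 1) _ rfl]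
      · simp only [hv, if_false, Bool.false_eq_true]
        rw [ih (t + 1 - (h + 1)).toNat (by omega) (h + 1) t _ rfl]
    · simp [dif_neg hle]

lemma pvLoop_main (degree : Int) (cs : List Char) :
    ∀ (m : Nat) (h t b : Int), (t + 1 - h).toNat = m → 0 ≤ h → t < (cs.length : Int) →
      List.foldl (pvF degree) b (pvLoopA cs h t [])
        = pvLoopB degree cs (pvPrefC cs 0) (cs.length : Int) h t b := by
  intro m
  induction m using Nat.strong_induction_on with
  | _ m ih =>
    intro h t b hm h0 ht
    conv_lhs => rw [pvLoopA]
    conv_rhs => rw [pvLoopB]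
    by_cases hle : h ≤ t
    · simp only [dif_pos hle]
      by_cases hv : pvIsVowel (pvGetC cs h) <;>
        simp only [hv, if_true, if_false, Bool.false_eq_true]
      · by_cases tv : pvIsVowel (pvGetC cs t) <;>
          simp only [tv, if_true, if_false, Bool.false_eq_true]
        · have hpeek := pvPeek_eq cs h
          by_cases pk : pvIsVowel (pvGetC cs (h + 1))
          · have hb : (h + 1 < (cs.length : Int) ∧ pvIsVowel (pvGetC cs (h + 1)) = true) := by
              apply of_decide_eq_true
              rw [← hpeek]; exact pk
            simp only [pk, if_true, List.nil_append]
            rw [pvLoopA_append cs (t - 1 + 1 - h).toNat h (t - 1) _ rfl,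
              List.foldl_append, List.foldl_cons, List.foldl_nil,
              pvF_slice degree cs b h t h0 hle ht,
              ih (t - 1 + 1 - h).toNat (by omega) h (t - 1) _ rfl h0 (by omega)]
            simp only [and_true]
            rw [if_pos hb.1]
          · have hb : ¬(h + 1 < (cs.length : Int) ∧ pvIsVowel (pvGetC cs (h + 1)) = true) := by
              intro hcontra
              exact pk (by rw [hpeek]; exact decide_eq_true hcontra)
            simp only [pk, if_false, Bool.false_eq_true, List.nil_append]
            rw [pvLoopA_append cs (t + 1 - (h + 1)).toNat (h + 1) t _ rfl,
              List.foldl_append, List.foldl_cons, List.foldl_nil,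
              pvF_slice degree cs b h t h0 hle ht,
              ih (t + 1 - (h + 1)).toNat (by omega) (h + 1) t _ rfl (by omega) ht]
            simp only [and_false, if_false]
        · exact ih (t - 1 + 1 - h).toNat (by omega) h (t - 1) b rfl h0 (by omega)
      · exact ih (t + 1 - (h + 1)).toNat (by omega) (h + 1) t b rfl (by omega) ht
    · simp [dif_neg hle]

-- ===== VERDICT (by name: the statement is the Claim_ definition above) =====
theorem longest_alp_spec : Claim_equal_longest_alp := by
  intro degree s _ _
  unfold Spec_longest_alp longest_alp longest_alp_alt
  exact pvLoop_main degree s.toList _ 0 _ 0 rfl (le_refl 0) (by omega)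

theorem longest_alp_raises : Claim_raises_longest_alp := by
  unfold Claim_raises_longest_alp
  refine ⟨fun _ _ _ hr hp => hp hr, by decide, by decide, ?_⟩
  show longest_alp_alt 0 "a" = 1
  simp [longest_alp_alt, pvLoopB, pvPrefC, pvGetC, pvGetI, pvBestUpd, pvIsVowel, pvVowels]

-- witness self-check: the raise witness really lies inside Raises_
theorem longest_alp_raises_witness_ok :
    Raises_longest_alp pvRaiseWitness_longest_alp.1 pvRaiseWitness_longest_alp.2 :=
  longest_alp_raises.2.2.1
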